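-- pv_equiv track=rewrite | github.com/syseeker/stellargraph | tests/data/test_breadth_first_walker.py | expected_bfw_size
-- ===== SOURCE A (Python) =====
-- def expected_bfw_size(n_size):
--     """
--     Calculates the number of nodes generated by a single BFW for a single root node.
--     :param n_size: <list> The number of neighbours at each depth level
--     :return: The size of the list returned by a single BFW on a single root node
--     """
--     total = []
--     for i, d in enumerate(n_size):
--         if i == 0:
--             total.append(d)
--         else:
--             total.append(total[-1] * d)
--     return sum(total) + 1  # add the root node
-- ===== SOURCE B (Python) =====
-- def expected_bfw_size(n_size):
--     # Horner evaluation from the deepest level up: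
--     # 1 + d0 + d0*d1 + ... = 1 + d0*(1 + d1*(1 + ...)).
--     # No prefix products are ever formed and nothing is summed.
--     total = 1
--     for d in reversed(n_size):
--         total = 1 + d * total
--     return total
-- ===== Notes on version B (the rewrite author's own statement) =====
-- stated objective: simpler
-- what changed: Replaces the forward pass that builds and sums the list of cumulative neighbour-count products by a backward Horner evaluation (total = 1 + d*total over the reversed list): no prefix products are ever computed and no summation happens.
import Mathlib
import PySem

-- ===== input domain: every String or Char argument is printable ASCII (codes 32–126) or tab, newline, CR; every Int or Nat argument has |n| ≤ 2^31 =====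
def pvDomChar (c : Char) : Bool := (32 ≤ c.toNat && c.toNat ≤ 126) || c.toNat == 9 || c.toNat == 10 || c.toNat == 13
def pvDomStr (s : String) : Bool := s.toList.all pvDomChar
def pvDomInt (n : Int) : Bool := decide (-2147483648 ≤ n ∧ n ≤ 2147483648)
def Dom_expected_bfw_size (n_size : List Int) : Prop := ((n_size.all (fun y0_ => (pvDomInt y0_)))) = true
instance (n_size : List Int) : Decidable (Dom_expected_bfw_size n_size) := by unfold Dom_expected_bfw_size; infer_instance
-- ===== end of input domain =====

-- B replaces A's forward build-and-sum of cumulative products by a backward Horner evaluation (simpler, O(1) space).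
-- ===== PORT A =====
-- literal port of A: build list `total` of cumulative products via enumerate, then sum + 1
def expected_bfw_size (n_size : List Int) : Int :=
  (PySem.List.enumerate n_size).foldl
    (fun (total : List Int) (id_ : Int × Int) =>
      if id_.1 = 0 then total ++ [id_.2]
      else total ++ [total.getLastD 0 * id_.2]) []  -- total[-1]; total is nonempty whenever i ≠ 0, so the default is never used
    |> (fun total => total.sum + 1)

-- ===== PORT B =====
-- literal port of B: Horner pass over the reversed list, total = 1 + d * total
def expected_bfw_size_alt (n_size : List Int) : Int :=
  n_size.reverse.foldl (fun (total : Int) (d : Int) => 1 + d * total) 1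

-- ===== PRECONDITION & SPEC =====
def Spec_expected_bfw_size (n_size : List Int) (out : Int) : Prop := out = expected_bfw_size_alt n_size
instance (n_size : List Int) (out : Int) : Decidable (Spec_expected_bfw_size n_size out) := by unfold Spec_expected_bfw_size; infer_instance

-- ===== CLAIM (what is proved, stated in full; the proofs are below) =====
def Claim_equal_expected_bfw_size : Prop := ∀ (n_size : List Int), Dom_expected_bfw_size n_size → Spec_expected_bfw_size n_size (expected_bfw_size n_size)

-- ===== LEMMAS AND PROOFS =====

-- B's backward foldl is the Horner foldr
theorem alt_eq_foldr (n_size : List Int) :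
    expected_bfw_size_alt n_size = n_size.foldr (fun d total => 1 + d * total) 1 := by
  unfold expected_bfw_size_alt
  rw [List.foldl_reverse]

-- proof-side scalar pair fold tracking A's (running product, running sum)
def pfold (ds : List Int) (p s : Int) : Int × Int :=
  ds.foldl (fun (pt : Int × Int) (d : Int) => (pt.1 * d, pt.2 + pt.1 * d)) (p, s)

-- the pair fold's sum equals s + p * (Horner value - 1)
theorem pfold_eq_horner (ds : List Int) (p s : Int) :
    (pfold ds p s).2 = s + p * (ds.foldr (fun d total => 1 + d * total) 1 - 1) := by
  induction ds generalizing p s with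
  | nil => simp [pfold]
  | cons d ds ih =>
    simp only [pfold, List.foldl_cons, List.foldr_cons] at *
    rw [ih]
    ring

-- main loop invariant: past index 0, A's list fold tracks the scalar pair fold via (sum, last)
theorem loop_inv (l : List (Int × Int)) (hl : ∀ q ∈ l, q.1 ≠ 0)
    (total : List Int) (ht : total ≠ []) :
    (((l.foldl (fun (total : List Int) (id_ : Int × Int) =>
        if id_.1 = 0 then total ++ [id_.2]
        else total ++ [total.getLastD 0 * id_.2]) total)).sum,
     ((l.foldl (fun (total : List Int) (id_ : Int × Int) =>
        if id_.1 = 0 then total ++ [id_.2]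
        else total ++ [total.getLastD 0 * id_.2]) total)).getLastD 0)
    = ((pfold (l.map Prod.snd) (total.getLastD 0) total.sum).2,
       (pfold (l.map Prod.snd) (total.getLastD 0) total.sum).1) := by
  induction l generalizing total with
  | nil => simp [pfold]
  | cons q l ih =>
    have hq : q.1 ≠ 0 := hl q (List.mem_cons_self ..)
    simp only [List.foldl_cons, List.map_cons, if_neg hq, pfold] at *
    have hne : total ++ [total.getLastD 0 * q.2] ≠ [] := by simp
    have := ih (fun r hr => hl r (List.mem_cons_of_mem _ hr)) (total ++ [total.getLastD 0 * q.2]) hne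
    rw [this]
    simp

-- ===== VERDICT (by name: the statement is the Claim_ definition above) =====
theorem expected_bfw_size_spec : Claim_equal_expected_bfw_size := by
  intro n_size _
  unfold Spec_expected_bfw_size
  rw [alt_eq_foldr]
  unfold expected_bfw_size
  cases n_size with
  | nil => decide
  | cons d ds =>
    rw [PySem.List.enumerate_cons]
    simp only [List.foldl_cons]
    rw [if_pos trivial]
    simp only [List.nil_append, List.foldr_cons]
    have hl : ∀ q ∈ PySem.List.enumerate ds (0 + 1), q.1 ≠ 0 := by
      intro q hq
      rcases (PySem.List.mem_enumerate_iff ds (0 + 1) q).1 hq with ⟨k, hk, rfl⟩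
      omega
    have h := loop_inv (PySem.List.enumerate ds (0 + 1)) hl [d] (by simp)
    have hmap : (PySem.List.enumerate ds (0 + 1)).map Prod.snd = ds :=
      PySem.List.map_snd_enumerate ..
    rw [hmap] at h
    simp only [show ([d].getLastD 0) = d from rfl, show ([d].sum) = d from by simp] at h
    have hsum := congrArg Prod.fst h
    dsimp only at hsum
    rw [hsum, pfold_eq_horner]
    ring
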